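-- pv_equiv track=rewrite | github.com/tunold/XRF_Parser_V1 | XRF_Parser_V1.py | _first_text_global_fuzzy
-- ===== SOURCE A (Python) =====
-- from typing import Dict, Any, List, Optional, Tuple, Iterable
--
-- def _localname(tag: str) -> str:
--     return tag.split('}', 1)[-1] if '}' in tag else tag
--
-- def _first_text_global_fuzzy(leaves_all: Dict[str, str], include: Iterable[str], exclude: Iterable[str] = ()) -> Optional[str]:
--     inc = [s.lower() for s in include]
--     exc = [s.lower() for s in exclude]
--     for k, v in leaves_all.items():
--         last = _localname(k.split("/")[-1]).lower()
--         if any(last == s for s in inc) and not any(x in last for x in exc):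
--             t = (v or "").strip()
--             if t:
--                 return t
--     for k, v in leaves_all.items():
--         last = _localname(k.split("/")[-1]).lower()
--         if any(s in last for s in inc) and not any(x in last for x in exc):
--             t = (v or "").strip()
--             if t:
--                 return t
--     return None
-- ===== SOURCE B (Python) =====
-- # Single pass over leaves_all with an eager exact-match return and a one-shot
-- # substring fallback, replacing A's two full passes.
-- def _localname(tag: str) -> str:
--     return tag.split('}', 1)[-1] if '}' in tag else tag
--
-- def _first_text_global_fuzzy(leaves_all, include, exclude=()):
--     inc = [s.lower() for s in include]
--     exc = [s.lower() for s in exclude]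
--     fallback = None
--     for k, v in leaves_all.items():
--         last = _localname(k.split("/")[-1]).lower()
--         t = (v or "").strip()
--         if not t or any(x in last for x in exc):
--             continue
--         if any(last == s for s in inc):
--             return t
--         if fallback is None and any(s in last for s in inc):
--             fallback = t
--     return fallback
-- ===== Notes on version B (the rewrite author's own statement) =====
-- stated objective: faster
-- what changed: Replaces A's two full passes (exact pass, then substring pass) by a single pass that returns an exact match eagerly and records the first substring match in a one-shot fallback variable returned at the end.
import Mathlib
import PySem

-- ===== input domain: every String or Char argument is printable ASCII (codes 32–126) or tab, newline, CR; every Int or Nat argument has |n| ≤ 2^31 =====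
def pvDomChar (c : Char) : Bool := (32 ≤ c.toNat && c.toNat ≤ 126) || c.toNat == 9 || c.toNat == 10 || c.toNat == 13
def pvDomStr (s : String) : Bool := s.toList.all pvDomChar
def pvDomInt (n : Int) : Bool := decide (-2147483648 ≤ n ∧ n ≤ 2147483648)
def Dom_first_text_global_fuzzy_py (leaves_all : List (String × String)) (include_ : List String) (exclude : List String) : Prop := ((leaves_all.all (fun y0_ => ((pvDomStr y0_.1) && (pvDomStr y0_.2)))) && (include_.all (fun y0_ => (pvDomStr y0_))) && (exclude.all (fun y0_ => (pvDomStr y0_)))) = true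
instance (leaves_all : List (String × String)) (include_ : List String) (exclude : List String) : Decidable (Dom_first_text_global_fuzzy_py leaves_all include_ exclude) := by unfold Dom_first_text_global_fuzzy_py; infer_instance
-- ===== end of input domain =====

-- B replaces A's two full passes by one pass with an eager exact-match return and a
-- one-shot substring fallback (objective: simpler). Same return value on every input.

-- ===== PORT A =====
-- _localname(tag) — shared helper of both Python files
def pvLocalname (tag : String) : String :=
  if PySem.Str.isIn "}" tag then
    PySem.List.pyGetD ((PySem.Str.splitMax? tag "}" 1).getD []) (-1) tag
  else tag

-- _localname(k.split("/")[-1]).lower() — shared by both Python files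
def pvLast (k : String) : String :=
  PySem.Str.lower (pvLocalname (PySem.List.pyGetD ((PySem.Str.split? k "/").getD []) (-1) ""))

-- first loop of A (exact match); '(v or "").strip()' = strip v on strings since strip "" = ""
def pyPass1 (inc exc : List String) : List (String × String) → Option String
  | [] => none
  | (k, v) :: rest =>
    let last := pvLast k
    if inc.any (fun s => last == s) && !(exc.any (fun x => PySem.Str.isIn x last)) then
      let t := PySem.Str.strip v
      if t ≠ "" then some t else pyPass1 inc exc rest
    else pyPass1 inc exc rest

-- second loop of A (substring match)
def pyPass2 (inc exc : List String) : List (String × String) → Option String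
  | [] => none
  | (k, v) :: rest =>
    let last := pvLast k
    if inc.any (fun s => PySem.Str.isIn s last) && !(exc.any (fun x => PySem.Str.isIn x last)) then
      let t := PySem.Str.strip v
      if t ≠ "" then some t else pyPass2 inc exc rest
    else pyPass2 inc exc rest

def first_text_global_fuzzy_py (leaves_all : List (String × String)) (include_ : List String) (exclude : List String) : Option String :=
  let inc := include_.map PySem.Str.lower
  let exc := exclude.map PySem.Str.lower
  match pyPass1 inc exc leaves_all with
  | some t => some t
  | none => pyPass2 inc exc leaves_all

-- ===== PORT B =====
-- the single loop of B, carrying the fallback variable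
def pyScan (inc exc : List String) (fallback : Option String) : List (String × String) → Option String
  | [] => fallback
  | (k, v) :: rest =>
    let last := pvLast k
    let t := PySem.Str.strip v
    if t == "" || exc.any (fun x => PySem.Str.isIn x last) then pyScan inc exc fallback rest
    else if inc.any (fun s => last == s) then some t
    else if fallback.isNone && inc.any (fun s => PySem.Str.isIn s last) then
      pyScan inc exc (some t) rest
    else pyScan inc exc fallback rest

def first_text_global_fuzzy_py_alt (leaves_all : List (String × String)) (include_ : List String) (exclude : List String) : Option String :=
  pyScan (include_.map PySem.Str.lower) (exclude.map PySem.Str.lower) none leaves_all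

-- ===== PRECONDITION & SPEC =====
def Spec_first_text_global_fuzzy_py (leaves_all : List (String × String)) (include_ : List String) (exclude : List String) (out : Option String) : Prop := out = first_text_global_fuzzy_py_alt leaves_all include_ exclude
instance (leaves_all : List (String × String)) (include_ : List String) (exclude : List String) (out : Option String) : Decidable (Spec_first_text_global_fuzzy_py leaves_all include_ exclude out) := by unfold Spec_first_text_global_fuzzy_py; infer_instance

-- ===== CLAIM (what is proved, stated in full; the proofs are below) =====
def Claim_equal_first_text_global_fuzzy_py : Prop := ∀ (leaves_all : List (String × String)) (include_ : List String) (exclude : List String), Dom_first_text_global_fuzzy_py leaves_all include_ exclude → Spec_first_text_global_fuzzy_py leaves_all include_ exclude (first_text_global_fuzzy_py leaves_all include_ exclude)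

-- ===== LEMMAS AND PROOFS =====

-- once the fallback is set, the scan returns the first exact hit if any, else the fallback
lemma pyScan_some (inc exc : List String) (f : String) (xs : List (String × String)) :
    pyScan inc exc (some f) xs =
      match pyPass1 inc exc xs with | some t => some t | none => some f := by
  induction xs with
  | nil => rfl
  | cons p rest ih =>
    obtain ⟨k, v⟩ := p
    simp only [pyScan, pyPass1]
    by_cases ht : PySem.Str.strip v = "" <;>
      cases he : (exc.any (fun x => PySem.Str.isIn x (pvLast k))) <;>
        cases hx : (inc.any (fun s => pvLast k == s)) <;>
          simp [ht, he, hx, ih]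

-- the scan with no fallback yet equals pass 1, falling back to pass 2
lemma pyScan_none (inc exc : List String) (xs : List (String × String)) :
    pyScan inc exc none xs =
      match pyPass1 inc exc xs with | some t => some t | none => pyPass2 inc exc xs := by
  induction xs with
  | nil => rfl
  | cons p rest ih =>
    obtain ⟨k, v⟩ := p
    simp only [pyScan, pyPass1, pyPass2]
    by_cases ht : PySem.Str.strip v = "" <;>
      cases he : (exc.any (fun x => PySem.Str.isIn x (pvLast k))) <;>
        cases hx : (inc.any (fun s => pvLast k == s)) <;>
          cases hs : (inc.any (fun s => PySem.Str.isIn s (pvLast k))) <;>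
            simp [ht, he, hx, hs, ih, pyScan_some]

-- ===== VERDICT (by name: the statement is the Claim_ definition above) =====
theorem first_text_global_fuzzy_py_spec : Claim_equal_first_text_global_fuzzy_py := by
  intro leaves_all include_ exclude _
  show _ = _
  rw [first_text_global_fuzzy_py, first_text_global_fuzzy_py_alt, pyScan_none]
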